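-- pv_equiv track=rewrite | github.com/steinstadt/AtCoder | ABC161/prob_d.py | num_add
-- ===== SOURCE A (Python) =====
-- def num_add(num_list, i):
--     if not num_list[i+1]==-1 and abs(num_list[i]+1-num_list[i+1])<=1:
--         num_list[i] += 1
--     elif num_list[i+1]==-1 and num_list[i]<9:
--         num_list[i] += 1
--         return num_list
--     elif num_list[i]==9:
--         if num_list[i+1]==-1:
--             num_list[i+1] = 1
--             num_list[i] = 0
--         else:
--             num_add(num_list, i+1)
--             num_list[i] = 0
--         return num_list
--     else:
--         num_add(num_list, i+1)
--         tmp = num_list[i+1] - 1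
--         if tmp<=0:
--             tmp = 0
--         num_list[i] = tmp
--     return num_list
-- ===== SOURCE B (Python) =====
-- def num_add(num_list, i):
--     # Two-phase iteration instead of recursion: scan up recording the carry
--     # chain, settle the stop position, then walk the chain back down.
--     # Mutates num_list in place and returns it, exactly like the original.
--     chain = []
--     j = i
--     while True:
--         b = num_list[j + 1]
--         a = num_list[j]
--         if (b != -1 and abs(a + 1 - b) > 1) or (b == -1 and a > 9):
--             chain.append((j, a))
--             j += 1
--         else:
--             break
--     if b == -1 and a == 9:
--         num_list[j + 1] = 1
--         num_list[j] = 0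
--     else:
--         num_list[j] = a + 1
--     for k, a in reversed(chain):
--         num_list[k] = 0 if a == 9 else max(num_list[k + 1] - 1, 0)
--     return num_list
-- ===== Notes on version B (the rewrite author's own statement) =====
-- stated objective: alternative
-- what changed: Replaces A's self-recursive carry propagation with an explicit two-phase iteration: an upward while-loop that records the carry chain and the stop index, then a single downward pass assigning each recorded position; no recursion.
import Mathlib
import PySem

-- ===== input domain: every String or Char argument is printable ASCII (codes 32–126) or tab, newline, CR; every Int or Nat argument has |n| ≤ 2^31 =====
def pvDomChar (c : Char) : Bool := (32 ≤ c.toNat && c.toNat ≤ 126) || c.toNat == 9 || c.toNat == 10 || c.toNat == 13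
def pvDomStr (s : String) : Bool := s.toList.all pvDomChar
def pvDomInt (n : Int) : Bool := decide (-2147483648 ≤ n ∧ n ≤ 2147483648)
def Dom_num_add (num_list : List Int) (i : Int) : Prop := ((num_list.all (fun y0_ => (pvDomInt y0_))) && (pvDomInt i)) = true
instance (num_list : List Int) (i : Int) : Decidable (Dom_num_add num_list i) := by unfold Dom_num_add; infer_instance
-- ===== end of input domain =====

-- B replaces A's recursion by an explicit two-phase loop (upward carry scan, then a
-- downward assignment pass); equivalence is about the return value (both Pythons also
-- perform the identical in-place mutation of num_list).

-- ===== PORT A =====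
def num_add (num_list : List Int) (i : Int) : List Int :=
  match h1 : PySem.List.pyGet? num_list (i + 1) with
  | none => num_list          -- Python raises IndexError here; excluded by Pre_
  | some b =>
    match PySem.List.pyGet? num_list i with
    | none => num_list        -- Python raises IndexError here; excluded by Pre_
    | some a =>
      if b ≠ -1 ∧ |a + 1 - b| ≤ 1 then
        PySem.List.pySetD num_list i (a + 1)
      else if b = -1 ∧ a < 9 then
        PySem.List.pySetD num_list i (a + 1)
      else if a = 9 then
        if b = -1 then
          PySem.List.pySetD (PySem.List.pySetD num_list (i + 1) 1) i 0
        else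
          PySem.List.pySetD (num_add num_list (i + 1)) i 0
      else
        let L' := num_add num_list (i + 1)
        let tmp := PySem.List.pyGetD L' (i + 1) 0 - 1
        let tmp := if tmp ≤ 0 then 0 else tmp
        PySem.List.pySetD L' i tmp
termination_by ((num_list.length : Int) - i).toNat
decreasing_by
  all_goals
    have hr : PySem.Raise.InRange num_list.length (i + 1) := by
      by_contra hc
      rw [← PySem.List.pyGet?_eq_none_iff (xs := num_list)] at hc
      simp [hc] at h1
    unfold PySem.Raise.InRange at hr
    omega

-- ===== PORT B =====
-- whether the walk must carry past position j (the while-loop condition of Source B)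
def pvCarry (b a : Int) : Bool :=
  (decide (b ≠ -1) && decide (1 < |a + 1 - b|)) || (decide (b = -1) && decide (9 < a))

-- phase 1 of Source B: the while loop; returns (chain of (index, digit) in scan order, stop index)
def pvScan (num_list : List Int) (j : Int) : List (Int × Int) × Int :=
  match h1 : PySem.List.pyGet? num_list (j + 1) with
  | none => ([], j)           -- Python raises IndexError here; excluded by Pre_
  | some b =>
    match PySem.List.pyGet? num_list j with
    | none => ([], j)         -- Python raises IndexError here; excluded by Pre_
    | some a =>
      if pvCarry b a then
        let r := pvScan num_list (j + 1)
        ((j, a) :: r.1, r.2)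
      else ([], j)
termination_by ((num_list.length : Int) - j).toNat
decreasing_by
  have hr : PySem.Raise.InRange num_list.length (j + 1) := by
    by_contra hc
    rw [← PySem.List.pyGet?_eq_none_iff (xs := num_list)] at hc
    simp [hc] at h1
  unfold PySem.Raise.InRange at hr
  omega

-- phase 2 body of Source B: one downward assignment
def pvStep (M : List Int) (ka : Int × Int) : List Int :=
  PySem.List.pySetD M ka.1
    (if ka.2 = 9 then 0 else max (PySem.List.pyGetD M (ka.1 + 1) 0 - 1) 0)

def num_add_alt (num_list : List Int) (i : Int) : List Int :=
  let r := pvScan num_list i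
  let j := r.2
  let b := PySem.List.pyGetD num_list (j + 1) 0
  let a := PySem.List.pyGetD num_list j 0
  let M :=
    if b = -1 ∧ a = 9 then
      PySem.List.pySetD (PySem.List.pySetD num_list (j + 1) 1) j 0
    else
      PySem.List.pySetD num_list j (a + 1)
  -- 'for k, a in reversed(chain)': foldr over the chain built in scan order
  r.1.foldr (fun ka M => pvStep M ka) M

-- ===== PRECONDITION & SPEC =====
-- Pre_ = exactly the inputs on which Python A returns (elsewhere both Pythons raise
-- IndexError): the index is not below -len, and at some position j in [i, len-1) the
-- upward carry walk can stop (adjacent pair within 1, or sentinel -1 with digit ≤ 9).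
def Pre_num_add (num_list : List Int) (i : Int) : Prop :=
  -(num_list.length : Int) ≤ i ∧
  ∃ j ∈ PySem.List.pyRange i ((num_list.length : Int) - 1) 1,
    pvCarry (PySem.List.pyGetD num_list (j + 1) 0) (PySem.List.pyGetD num_list j 0) = false
instance (num_list : List Int) (i : Int) : Decidable (Pre_num_add num_list i) := by
  unfold Pre_num_add; infer_instance

def pvWitness_num_add : List Int × Int := ([1, 2, -1], 0)

def Spec_num_add (num_list : List Int) (i : Int) (out : List Int) : Prop := out = num_add_alt num_list i
instance (num_list : List Int) (i : Int) (out : List Int) : Decidable (Spec_num_add num_list i out) := by unfold Spec_num_add; infer_instance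

-- ===== CLAIM (what is proved, stated in full; the proofs are below) =====
def Claim_equal_num_add : Prop := ∀ (num_list : List Int) (i : Int), Dom_num_add num_list i → Pre_num_add num_list i → Spec_num_add num_list i (num_add num_list i)

-- ===== LEMMAS AND PROOFS =====


lemma pvGetD_of_some {L : List Int} {i b : Int} (h : PySem.List.pyGet? L i = some b) :
    PySem.List.pyGetD L i 0 = b := by
  show (PySem.List.pyGet? L i).getD 0 = b
  rw [h]; rfl

lemma pvAccess {L : List Int} {i : Int} (h1 : -(L.length : Int) ≤ i) (h2 : i < L.length) :
    ∃ x, PySem.List.pyGet? L i = some x := by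
  cases h : PySem.List.pyGet? L i with
  | some x => exact ⟨x, rfl⟩
  | none =>
    rw [PySem.List.pyGet?_eq_none_iff] at h
    unfold PySem.Raise.InRange at h
    omega

lemma num_add_eq_some {L : List Int} {i a b : Int}
    (hb : PySem.List.pyGet? L (i+1) = some b) (ha : PySem.List.pyGet? L i = some a) :
    num_add L i =
      if b ≠ -1 ∧ |a + 1 - b| ≤ 1 then PySem.List.pySetD L i (a + 1)
      else if b = -1 ∧ a < 9 then PySem.List.pySetD L i (a + 1)
      else if a = 9 then
        (if b = -1 then PySem.List.pySetD (PySem.List.pySetD L (i + 1) 1) i 0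
         else PySem.List.pySetD (num_add L (i + 1)) i 0)
      else
        (let L' := num_add L (i + 1)
         let tmp := PySem.List.pyGetD L' (i + 1) 0 - 1
         let tmp := if tmp ≤ 0 then 0 else tmp
         PySem.List.pySetD L' i tmp) := by
  conv_lhs => rw [num_add.eq_def]
  split
  · next h => rw [h] at hb; cases hb
  · next b' h =>
    rw [h] at hb; injection hb with hb; subst hb
    split
    · next h2 => rw [h2] at ha; cases ha
    · next a' h2 => rw [h2] at ha; injection ha with ha; subst ha; rfl

lemma pvScan_eq_some {L : List Int} {i a b : Int}
    (hb : PySem.List.pyGet? L (i+1) = some b) (ha : PySem.List.pyGet? L i = some a) :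
    pvScan L i =
      if pvCarry b a then ((i, a) :: (pvScan L (i+1)).1, (pvScan L (i+1)).2)
      else ([], i) := by
  conv_lhs => rw [pvScan.eq_def]
  split
  · next h => rw [h] at hb; cases hb
  · next b' h =>
    rw [h] at hb; injection hb with hb; subst hb
    split
    · next h2 => rw [h2] at ha; cases ha
    · next a' h2 => rw [h2] at ha; injection ha with ha; subst ha; rfl

lemma pvAlt_recurse {L : List Int} {i a b : Int}
    (hb : PySem.List.pyGet? L (i+1) = some b) (ha : PySem.List.pyGet? L i = some a)
    (hc : pvCarry b a = true) :
    num_add_alt L i = pvStep (num_add_alt L (i+1)) (i, a) := by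
  unfold num_add_alt
  rw [pvScan_eq_some hb ha, if_pos hc]
  rfl

lemma pvAlt_stop {L : List Int} {i a b : Int}
    (hb : PySem.List.pyGet? L (i+1) = some b) (ha : PySem.List.pyGet? L i = some a)
    (hc : pvCarry b a = false) :
    num_add_alt L i =
      (if b = -1 ∧ a = 9 then
        PySem.List.pySetD (PySem.List.pySetD L (i + 1) 1) i 0
       else PySem.List.pySetD L i (a + 1)) := by
  unfold num_add_alt
  rw [pvScan_eq_some hb ha, if_neg (by simp [hc])]
  simp only [List.foldr_nil, pvGetD_of_some hb, pvGetD_of_some ha]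

lemma pvCarry_true {b a : Int} (h : pvCarry b a = true) :
    (b ≠ -1 ∧ 1 < |a + 1 - b|) ∨ (b = -1 ∧ 9 < a) := by
  unfold pvCarry at h
  rcases Bool.or_eq_true_iff.mp h with h' | h' <;>
    [left; right] <;> simpa using h'

lemma pvCarry_false {b a : Int} (h : pvCarry b a = false) :
    (b ≠ -1 → |a + 1 - b| ≤ 1) ∧ (b = -1 → a ≤ 9) := by
  unfold pvCarry at h
  simp only [Bool.or_eq_false_iff, Bool.and_eq_false_iff] at h
  constructor
  · intro hbne
    rcases h.1 with h' | h' <;> simp at h'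
    · exact absurd h' hbne
    · exact h'
  · intro hbeq
    rcases h.2 with h' | h' <;> simp at h'
    · exact absurd hbeq h'
    · exact h'

lemma pvMain : ∀ (k : Nat) (L : List Int) (i : Int),
    (((L.length : Int) - i).toNat ≤ k) → Pre_num_add L i → num_add L i = num_add_alt L i := by
  intro k
  induction k with
  | zero =>
    intro L i hk hpre
    obtain ⟨hlo, j, hjmem, _⟩ := hpre
    rw [PySem.List.mem_pyRange_one] at hjmem
    omega
  | succ k ih =>
    intro L i hk hpre
    obtain ⟨hlo, j, hjmem, hjstop⟩ := hpre
    rw [PySem.List.mem_pyRange_one] at hjmem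
    obtain ⟨b, hb⟩ := pvAccess (L := L) (i := i + 1) (by omega) (by omega)
    obtain ⟨a, ha⟩ := pvAccess (L := L) (i := i) hlo (by omega)
    rw [num_add_eq_some hb ha]
    by_cases hc : pvCarry b a
    · -- carry at i: both sides recurse / fold one more step
      have hji : i + 1 ≤ j := by
        rcases eq_or_lt_of_le hjmem.1 with h | h
        · exfalso
          rw [← h, pvGetD_of_some hb, pvGetD_of_some ha] at hjstop
          rw [hjstop] at hc; cases hc
        · omega
      have hrec : num_add L (i + 1) = num_add_alt L (i + 1) := by
        apply ih L (i + 1) (by omega)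
        exact ⟨by omega, j, by rw [PySem.List.mem_pyRange_one]; omega, hjstop⟩
      rw [pvAlt_recurse hb ha hc]
      rcases pvCarry_true hc with ⟨hbne, habs⟩ | ⟨hbeq, ha9'⟩
      · have c1 : ¬(b ≠ -1 ∧ |a + 1 - b| ≤ 1) := fun h => absurd h.2 (not_le.mpr habs)
        have c2 : ¬(b = -1 ∧ a < 9) := fun h => hbne h.1
        rw [if_neg c1, if_neg c2]
        by_cases ha9 : a = 9
        · rw [if_pos ha9, if_neg hbne, hrec]
          unfold pvStep
          simp [ha9]
        · rw [if_neg ha9, hrec]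
          unfold pvStep
          simp only [if_neg ha9]
          split
          · next h => congr 1; omega
          · next h => congr 1; omega
      · have c1 : ¬(b ≠ -1 ∧ |a + 1 - b| ≤ 1) := fun h => h.1 hbeq
        have c2 : ¬(b = -1 ∧ a < 9) := fun h => by omega
        have ha9 : ¬(a = 9) := by omega
        rw [if_neg c1, if_neg c2, if_neg ha9, hrec]
        unfold pvStep
        simp only [if_neg ha9]
        split
        · next h => congr 1; omega
        · next h => congr 1; omega
    · -- stop at i: the walk halts here, compare base branches
      rw [pvAlt_stop hb ha (Bool.not_eq_true _ ▸ hc)]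
      have hcf := pvCarry_false (Bool.not_eq_true _ ▸ hc)
      by_cases hbeq : b = -1
      · have c1 : ¬(b ≠ -1 ∧ |a + 1 - b| ≤ 1) := fun h => h.1 hbeq
        rw [if_neg c1]
        by_cases ha9 : a = 9
        · rw [if_neg (fun h : b = -1 ∧ a < 9 => by omega), if_pos ha9, if_pos hbeq,
             if_pos ⟨hbeq, ha9⟩]
        · have halt : a < 9 := lt_of_le_of_ne (hcf.2 hbeq) ha9
          rw [if_pos ⟨hbeq, halt⟩, if_neg (fun h : b = -1 ∧ a = 9 => ha9 h.2)]
      · rw [if_pos ⟨hbeq, hcf.1 hbeq⟩, if_neg (fun h : b = -1 ∧ a = 9 => hbeq h.1)]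

-- ===== VERDICT (by name: the statement is the Claim_ definition above) =====
theorem num_add_spec : Claim_equal_num_add := by
  intro L i _ hpre
  unfold Spec_num_add
  exact pvMain ((L.length : Int) - i).toNat L i le_rfl hpre
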